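-- pv_equiv track=rewrite | github.com/pypi-data/pypi-mirror-16 | packages/wrenlab/wrenlab-0.1.2.tar.gz/wrenlab-0.1.2/wrenlab/R.py | fix_index
-- ===== SOURCE A (Python) =====
-- def rstrip_digit(x):
--     for i in reversed(range(len(x))):
--         if not x[i].isdigit():
--             return x[:(i+1)]
--     return ""
--
-- def fix_index(index):
--     o = []
--     for ix in index:
--         if ix == "(Intercept)":
--             o.append("Intercept")
--             continue
--         else:
--             ixs = []
--             for six in ix.split(":"):
--                 base = rstrip_digit(six)
--                 if len(base) < len(six):
--                     digit = six[len(base):]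
--                     six = "{}[{}]".format(base, digit)
--                 ixs.append(six)
--             o.append(":".join(ixs))
--     return o
-- ===== SOURCE B (Python) =====
-- def fix_index(index):
--     # One-pass character state machine: instead of splitting on ':' and
--     # right-stripping digits per segment, scan each name once, buffering the
--     # current digit run; a run still pending at a ':' or at end-of-string is
--     # a trailing run and is emitted bracketed, otherwise it is flushed plain.
--     result = []
--     for ix in index:
--         if ix == "(Intercept)":
--             result.append("Intercept")
--             continue
--         out = []
--         run = []
--         for c in ix:
--             if c.isdigit():
--                 run.append(c)
--             elif c == ":":
--                 if run:
--                     out.append("[")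
--                     out.extend(run)
--                     out.append("]")
--                     run = []
--                 out.append(":")
--             else:
--                 out.extend(run)
--                 run = []
--                 out.append(c)
--         if run:
--             out.append("[")
--             out.extend(run)
--             out.append("]")
--         result.append("".join(out))
--     return result
-- ===== Notes on version B (the rewrite author's own statement) =====
-- stated objective: alternative
-- what changed: A's split(':') / per-segment reverse digit-strip / format / join pipeline is replaced by a single left-to-right character state machine per name that buffers the current digit run and emits it bracketed when a ':' or end-of-string shows it is trailing, plain otherwise.
import Mathlib
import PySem

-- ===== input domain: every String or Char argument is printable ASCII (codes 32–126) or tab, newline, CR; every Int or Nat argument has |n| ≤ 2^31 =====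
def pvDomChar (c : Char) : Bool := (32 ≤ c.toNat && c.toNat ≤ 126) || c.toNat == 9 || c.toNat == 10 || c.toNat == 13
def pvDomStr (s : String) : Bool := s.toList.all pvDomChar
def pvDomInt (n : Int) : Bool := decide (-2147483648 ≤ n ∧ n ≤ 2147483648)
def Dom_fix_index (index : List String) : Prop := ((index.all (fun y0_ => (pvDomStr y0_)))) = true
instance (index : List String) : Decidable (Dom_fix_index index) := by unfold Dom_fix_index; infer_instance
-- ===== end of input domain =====

-- B replaces A's split/strip/format/join pipeline with a one-pass character state machine (alternative, same cost).

-- ===== PORT A =====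
-- rstrip_digit: for i in reversed(range(len(x))): if not x[i].isdigit(): return x[:(i+1)]; return ""
-- ported as a recursion over the reversed character list; x[:(i+1)] is the reverse of the remaining suffix.
-- (.isdigit() on a single char = PySem.Chars.isdigit; exact on the ASCII domain)
def rstripDigitGo : List Char → List Char
  | [] => []
  | c :: rest => if !(PySem.Chars.isdigit c) then (c :: rest).reverse else rstripDigitGo rest

def fix_index (index : List String) : List String :=
  index.foldl (fun o ix =>
    if ix = "(Intercept)" then o ++ ["Intercept"]
    else
      let ixs : List (List Char) :=
        (PySem.Chars.splitOn ix.toList [':']).foldl (fun ixs six =>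
          let base := rstripDigitGo six.reverse
          let six := if base.length < six.length
            then base ++ ('[' :: (PySem.List.slice six (some (base.length : Int)) none ++ [']']))
            else six
          ixs ++ [six]) []
      o ++ [String.mk (PySem.Chars.join [':'] ixs)]) []

-- ===== PORT B =====
-- the inner 'for c in ix' loop of Source B: out / run are the two accumulator lists
def fixGo : List Char → List Char → List Char → List Char
  | out, run, [] => if run = [] then out else out ++ '[' :: (run ++ [']'])
  | out, run, c :: rest =>
    if PySem.Chars.isdigit c then fixGo out (run ++ [c]) rest
    else if c = ':' then
      fixGo ((if run = [] then out else out ++ '[' :: (run ++ [']'])) ++ [':']) [] rest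
    else fixGo (out ++ run ++ [c]) [] rest

def fix_index_alt (index : List String) : List String :=
  index.foldl (fun result ix =>
    if ix = "(Intercept)" then result ++ ["Intercept"]
    else result ++ [String.mk (fixGo [] [] ix.toList)]) []

-- ===== PRECONDITION & SPEC =====
def Spec_fix_index (index : List String) (out : List String) : Prop := out = fix_index_alt index
instance (index : List String) (out : List String) : Decidable (Spec_fix_index index out) := by unfold Spec_fix_index; infer_instance

-- ===== CLAIM =====
def Claim_equal_fix_index : Prop := ∀ (index : List String), Dom_fix_index index → Spec_fix_index index (fix_index index)

-- ===== LEMMAS AND PROOFS =====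

-- clean per-segment transform (what A's inner loop does to one colon-free segment)
def segA (s : List Char) : List Char :=
  let d := s.reverse.dropWhile PySem.Chars.isdigit
  if d.length < s.length then d.reverse ++ '[' :: (s.drop d.length ++ [']']) else s

-- a structural re-statement of PySem.Chars.splitOn on the single separator ':'
def prependHead (p : List Char) : List (List Char) → List (List Char)
  | [] => [p]
  | s :: ss => (p ++ s) :: ss

def mySplit : List Char → List (List Char)
  | [] => [[]]
  | c :: rest => if c = ':' then [] :: mySplit rest else prependHead [c] (mySplit rest)

lemma mySplit_ne_nil (l : List Char) : mySplit l ≠ [] := by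
  cases l with
  | nil => simp [mySplit]
  | cons c rest =>
    simp only [mySplit]
    split
    · simp
    · cases h : mySplit rest <;> simp [prependHead]

lemma splitOn_go_eq (l : List Char) :
    ∀ (fuel : Nat) (cur : List Char) (acc : List (List Char)), l.length < fuel →
      PySem.Chars.splitOn.go [':'] fuel l cur acc
        = acc.reverse ++ prependHead cur.reverse (mySplit l) := by
  induction l with
  | nil =>
    intro fuel cur acc h
    cases fuel with
    | zero => omega
    | succ f => simp [PySem.Chars.splitOn.go, mySplit, prependHead]
  | cons c rest ih =>
    intro fuel cur acc h
    cases fuel with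
    | zero => omega
    | succ f =>
      by_cases hc : c = ':'
      · subst hc
        have hp : List.isPrefixOf [':'] (':' :: rest) = true := by
          simp [List.isPrefixOf]
        rw [show PySem.Chars.splitOn.go [':'] (f+1) (':' :: rest) cur acc
              = PySem.Chars.splitOn.go [':'] f rest [] (cur.reverse :: acc) by
            simp [PySem.Chars.splitOn.go, hp]]
        rw [ih f [] (cur.reverse :: acc) (by simpa using Nat.lt_of_succ_lt_succ h)]
        cases hm : mySplit rest with
        | nil => exact absurd hm (mySplit_ne_nil rest)
        | cons s ss => simp [mySplit, prependHead, hm]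
      · have hp : List.isPrefixOf [':'] (c :: rest) = false := by
          simp [List.isPrefixOf]
          exact fun hh => hc hh.symm
        rw [show PySem.Chars.splitOn.go [':'] (f+1) (c :: rest) cur acc
              = PySem.Chars.splitOn.go [':'] f rest (c :: cur) acc by
            simp [PySem.Chars.splitOn.go, hp]]
        rw [ih f (c :: cur) acc (by simpa using Nat.lt_of_succ_lt_succ h)]
        simp only [mySplit, hc, if_false, List.reverse_cons]
        cases hm : mySplit rest with
        | nil => exact absurd hm (mySplit_ne_nil rest)
        | cons s ss => simp [prependHead]

lemma splitOn_eq_mySplit (l : List Char) : PySem.Chars.splitOn l [':'] = mySplit l := by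
  rw [PySem.Chars.splitOn, splitOn_go_eq l (l.length + 1) [] [] (Nat.lt_succ_self _)]
  cases hm : mySplit l with
  | nil => exact absurd hm (mySplit_ne_nil l)
  | cons s ss => simp [prependHead]

lemma mySplit_prepend (p : List Char) (hp : ':' ∉ p) (t : List Char) :
    mySplit (p ++ t) = prependHead p (mySplit t) := by
  induction p with
  | nil =>
    cases hm : mySplit t with
    | nil => exact absurd hm (mySplit_ne_nil t)
    | cons s ss => simp [prependHead, hm]
  | cons c p' ih =>
    have hc : c ≠ ':' := fun h => hp (h ▸ List.mem_cons_self ..)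
    have hp' : ':' ∉ p' := fun h => hp (List.mem_cons_of_mem _ h)
    simp only [List.cons_append, mySplit, hc, if_false, ih hp']
    cases hm : mySplit t with
    | nil => exact absurd hm (mySplit_ne_nil t)
    | cons s ss => simp [prependHead]

lemma mySplit_no_colon (l : List Char) (h : ':' ∉ l) : mySplit l = [l] := by
  have := mySplit_prepend l h []
  simpa [mySplit, prependHead] using this

-- A's reverse-index loop computes: drop the leading digits of the reversed list, then reverse back.
lemma rstripDigitGo_eq (r : List Char) :
    rstripDigitGo r = (r.dropWhile (fun c => PySem.Chars.isdigit c)).reverse := by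
  induction r with
  | nil => rfl
  | cons c rest ih =>
    by_cases h : PySem.Chars.isdigit c
    · simp [rstripDigitGo, h, List.dropWhile, ih]
    · simp [rstripDigitGo, h, List.dropWhile]

-- A's inner-loop body on one segment is segA
lemma seg_eq (six : List Char) :
    (let base := rstripDigitGo six.reverse
     if base.length < six.length
       then base ++ ('[' :: (PySem.List.slice six (some (base.length : Int)) none ++ [']']))
       else six) = segA six := by
  have hb : rstripDigitGo six.reverse
      = (six.reverse.dropWhile PySem.Chars.isdigit).reverse := by
    rw [rstripDigitGo_eq]
  have hsl : ∀ n : Nat, PySem.List.slice six (some ((n : Nat) : Int)) none = six.drop n := by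
    intro n
    rw [PySem.List.slice_from six (by positivity)]
    simp
  simp only [hb, segA, List.length_reverse, hsl]

-- the all-digits run: its strip is empty, its segA is the bracket form
lemma segA_digits (run : List Char) (hd : ∀ c ∈ run, PySem.Chars.isdigit c = true) :
    segA run = if run = [] then [] else '[' :: (run ++ [']']) := by
  have h1 : run.reverse.dropWhile PySem.Chars.isdigit = [] := by
    rw [List.dropWhile_eq_nil_iff]
    intro c hc
    exact hd c (List.mem_reverse.mp hc)
  simp only [segA, h1]
  cases run with
  | nil => simp
  | cons c r => simp

-- segA pulls a colon-free all-digit-free-ended prefix out front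
lemma segA_prepend (run : List Char) (c : Char) (h : List Char)
    (hc : PySem.Chars.isdigit c = false) :
    segA (run ++ c :: h) = run ++ c :: segA h := by
  have hdw : (run ++ c :: h).reverse.dropWhile PySem.Chars.isdigit
      = h.reverse.dropWhile PySem.Chars.isdigit ++ c :: run.reverse := by
    rw [show (run ++ c :: h).reverse = h.reverse ++ c :: run.reverse by simp]
    induction h.reverse with
    | nil => simp [List.dropWhile, hc]
    | cons x xs ih =>
      by_cases hx : PySem.Chars.isdigit x
      · simp [List.dropWhile, hx, ih]
      · simp [List.dropWhile, hx]
  have hle : (h.reverse.dropWhile PySem.Chars.isdigit).length ≤ h.length := by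
    simpa using List.length_dropWhile_le PySem.Chars.isdigit h.reverse
  have hdrop : (run ++ c :: h).drop ((h.reverse.dropWhile PySem.Chars.isdigit).length + run.length + 1)
      = h.drop (h.reverse.dropWhile PySem.Chars.isdigit).length := by
    rw [show run ++ c :: h = (run ++ [c]) ++ h by simp, List.drop_append]
    rw [List.drop_eq_nil_of_le (by simp)]
    simp [Nat.add_comm]
  simp only [segA, hdw]
  split_ifs with h1 h2 h2
  · simp only [List.length_append, List.length_cons, List.length_reverse] at *
    simp
    exact hdrop
  · exfalso; simp only [List.length_append, List.length_cons, List.length_reverse] at h1; omega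
  · exfalso; apply h1; simp only [List.length_append, List.length_cons, List.length_reverse]; omega
  · rfl

-- the value B's machine computes on one name, phrased through A's decomposition
def S (t : List Char) : List Char := PySem.Chars.join [':'] ((mySplit t).map segA)

lemma S_colon (run rest : List Char) (hd : ∀ c ∈ run, PySem.Chars.isdigit c = true) :
    S (run ++ ':' :: rest) = segA run ++ ':' :: S rest := by
  have hnc : ':' ∉ run := by
    intro h
    have := hd ':' h
    simp [PySem.Chars.isdigit] at this
  unfold S
  rw [show run ++ ':' :: rest = run ++ (':' :: rest) from rfl,
      mySplit_prepend run hnc, show mySplit (':' :: rest) = [] :: mySplit rest by simp [mySplit]]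
  simp only [prependHead, List.append_nil, List.map_cons]
  cases hm : mySplit rest with
  | nil => exact absurd hm (mySplit_ne_nil rest)
  | cons s ss =>
    simp [PySem.Chars.join, List.intercalate]

lemma S_plain (run : List Char) (c : Char) (rest : List Char)
    (hd : ∀ x ∈ run, PySem.Chars.isdigit x = true)
    (hc : PySem.Chars.isdigit c = false) (hcc : c ≠ ':') :
    S (run ++ c :: rest) = run ++ c :: S rest := by
  have hnc : ':' ∉ run ++ [c] := by
    intro h
    rcases List.mem_append.mp h with h | h
    · have := hd ':' h; simp [PySem.Chars.isdigit] at this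
    · simp at h; exact hcc h.symm
  unfold S
  rw [show run ++ c :: rest = (run ++ [c]) ++ rest by simp, mySplit_prepend _ hnc]
  cases hm : mySplit rest with
  | nil => exact absurd hm (mySplit_ne_nil rest)
  | cons s ss =>
    simp only [prependHead, List.map_cons]
    rw [show (run ++ [c]) ++ s = run ++ c :: s by simp, segA_prepend run c s hc]
    cases ss with
    | nil => simp [PySem.Chars.join, List.intercalate]
    | cons s' ss' => simp [PySem.Chars.join, List.intercalate]

-- the machine invariant: fixGo with an all-digit pending run computes out ++ S (run ++ s)
lemma fixGo_eq (s : List Char) :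
    ∀ (out run : List Char), (∀ c ∈ run, PySem.Chars.isdigit c = true) →
      fixGo out run s = out ++ S (run ++ s) := by
  induction s with
  | nil =>
    intro out run hd
    have hnc : ':' ∉ run := by
      intro h
      have := hd ':' h
      simp [PySem.Chars.isdigit] at this
    have hS : S run = if run = [] then [] else '[' :: (run ++ [']']) := by
      unfold S
      rw [mySplit_no_colon run hnc]
      simp [PySem.Chars.join, List.intercalate, segA_digits run hd]
    show (if run = [] then out else out ++ '[' :: (run ++ [']'])) = out ++ S (run ++ [])
    rw [List.append_nil, hS]
    split_ifs <;> simp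
  | cons c rest ih =>
    intro out run hd
    by_cases h1 : PySem.Chars.isdigit c
    · rw [show fixGo out run (c :: rest) = fixGo out (run ++ [c]) rest by simp [fixGo, h1]]
      rw [ih out (run ++ [c]) (by
        intro x hx
        rcases List.mem_append.mp hx with hx | hx
        · exact hd x hx
        · simp at hx; subst hx; exact h1)]
      simp
    · by_cases h2 : c = ':'
      · subst h2
        rw [show fixGo out run (':' :: rest)
            = fixGo ((if run = [] then out else out ++ '[' :: (run ++ [']'])) ++ [':']) [] rest by
          simp [fixGo, h1]]
        rw [ih _ [] (by simp)]
        rw [S_colon run rest hd, segA_digits run hd]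
        by_cases hr : run = [] <;> simp [hr]
      · rw [show fixGo out run (c :: rest) = fixGo (out ++ run ++ [c]) [] rest by
          simp [fixGo, h1, h2]]
        rw [ih _ [] (by simp)]
        rw [S_plain run c rest hd (by simpa using h1) h2]
        simp

-- an append-accumulator foldl over the segments is a map
lemma foldl_append_map {α β : Type} (f : α → β) (l : List α) (a : List β) :
    List.foldl (fun acc x => acc ++ [f x]) a l = a ++ l.map f := by
  induction l generalizing a with
  | nil => simp
  | cons x xs ih => simp [List.foldl, ih]

-- A's whole per-name computation equals S
lemma fixA_name (ix : String) :
    String.mk (PySem.Chars.join [':']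
      ((PySem.Chars.splitOn ix.toList [':']).foldl (fun ixs six =>
        let base := rstripDigitGo six.reverse
        let six := if base.length < six.length
          then base ++ ('[' :: (PySem.List.slice six (some (base.length : Int)) none ++ [']']))
          else six
        ixs ++ [six]) []))
    = String.mk (fixGo [] [] ix.toList) := by
  rw [show (fun (ixs : List (List Char)) six =>
        let base := rstripDigitGo six.reverse
        let six := if base.length < six.length
          then base ++ ('[' :: (PySem.List.slice six (some (base.length : Int)) none ++ [']']))
          else six
        ixs ++ [six]) = (fun ixs six => ixs ++ [segA six]) from
    funext fun ixs => funext fun six => by simp only []; rw [seg_eq six]]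
  rw [foldl_append_map, splitOn_eq_mySplit, fixGo_eq ix.toList [] [] (by simp)]
  simp [S]

-- ===== VERDICT =====
theorem fix_index_spec : Claim_equal_fix_index := by
  intro index _
  show fix_index index = fix_index_alt index
  unfold fix_index fix_index_alt
  have hbody :
      (fun (o : List String) (ix : String) =>
        if ix = "(Intercept)" then o ++ ["Intercept"]
        else
          let ixs : List (List Char) :=
            (PySem.Chars.splitOn ix.toList [':']).foldl (fun ixs six =>
              let base := rstripDigitGo six.reverse
              let six := if base.length < six.length
                then base ++ ('[' :: (PySem.List.slice six (some (base.length : Int)) none ++ [']']))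
                else six
              ixs ++ [six]) []
          o ++ [String.mk (PySem.Chars.join [':'] ixs)])
      = (fun (result : List String) (ix : String) =>
          if ix = "(Intercept)" then result ++ ["Intercept"]
          else result ++ [String.mk (fixGo [] [] ix.toList)]) := by
    funext o ix
    by_cases h : ix = "(Intercept)"
    · simp [h]
    · simp only [h, if_false]
      rw [fixA_name ix]
  rw [hbody]
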